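-- pv_equiv track=rewrite | github.com/JavedAnsari-SIM/insights-ui-automation | src/pytestifypro/managers/queries_manager.py | _parse_queries
-- ===== SOURCE A (Python) =====
-- def _parse_queries(queries_content):
--     """
--     Parse a file containing multiple queries, separated by comments in the format '-- query_name'.
--     Returns a dictionary of query_name -> query.
--     """
--     queries = {}
--     current_name = None
--     current_query = []
--
--     for line in queries_content.splitlines():
--         line = line.strip()
--         if line.startswith("--"):
--             if current_name:
--                 queries[current_name] = "\n".join(current_query).strip()
--             current_name = line[2:].strip()
--             current_query = []
--         elif line:
--             current_query.append(line)
--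
--     if current_name:
--         queries[current_name] = "\n".join(current_query).strip()
--
--     return queries
-- ===== SOURCE B (Python) =====
-- def _parse_queries(queries_content):
--     """Section-based parse: clean the lines once, then chunk them into
--     (header, body) sections recursively instead of a line-by-line state machine."""
--     lines = [l for l in (raw.strip() for raw in queries_content.splitlines()) if l]
--     return _sections(lines, {})
--
--
-- def _sections(lines, queries):
--     if not lines:
--         return queries
--     head, rest = lines[0], lines[1:]
--     body, rest = _span_body(rest)
--     if head.startswith("--"):
--         name = head[2:].strip()
--         if name:
--             queries[name] = "\n".join(body)
--     return _sections(rest, queries)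
--
--
-- def _span_body(lines):
--     if lines and not lines[0].startswith("--"):
--         body, rest = _span_body(lines[1:])
--         return [lines[0]] + body, rest
--     return [], lines
-- ===== Notes on version B (the rewrite author's own statement) =====
-- stated objective: alternative
-- what changed: B replaces A's line-by-line state machine (current_name/current_query accumulators with flush-on-header) by a two-phase decomposition: clean the lines once, then recursively chunk them into (header, body) sections and assign each named section's joined body.
import Mathlib
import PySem

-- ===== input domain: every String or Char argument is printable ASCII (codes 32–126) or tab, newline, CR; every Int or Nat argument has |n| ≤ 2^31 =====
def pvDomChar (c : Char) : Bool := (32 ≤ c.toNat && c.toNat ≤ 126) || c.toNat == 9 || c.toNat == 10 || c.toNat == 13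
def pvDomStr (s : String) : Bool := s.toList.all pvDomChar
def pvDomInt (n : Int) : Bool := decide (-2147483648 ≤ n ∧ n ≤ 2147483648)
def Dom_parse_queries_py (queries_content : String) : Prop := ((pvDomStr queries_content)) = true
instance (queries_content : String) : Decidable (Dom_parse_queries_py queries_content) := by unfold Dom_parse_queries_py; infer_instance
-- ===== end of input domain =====

-- B parses by chunking the cleaned lines into (header, body) sections instead of A's
-- line-by-line state machine; objective: alternative decomposition (same cost).

-- ===== PORT A =====
-- Python's `current_name = None` is modelled as "": Python only tests it for truthiness
-- (`if current_name:`), where None and "" behave identically, and "" can reach the same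
-- state via a `--` header with empty name.
-- the flush `queries[current_name] = "\n".join(current_query).strip()` guarded by
-- `if current_name:` (written twice verbatim in A)
def pvFlushA (st : PySem.Dict String String × String × List String) : PySem.Dict String String :=
  if st.2.1 ≠ "" then st.1.insert st.2.1 (PySem.Str.strip (PySem.Str.join "\n" st.2.2)) else st.1

-- one iteration of A's `for line in queries_content.splitlines():`
def pvStepA (st : PySem.Dict String String × String × List String) (rawLine : String) :
    PySem.Dict String String × String × List String :=
  let line := PySem.Str.strip rawLine
  if PySem.Str.startswith line "--" then
    (pvFlushA st, PySem.Str.strip (PySem.Str.slice line (some 2) none), ([] : List String))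
  else if line ≠ "" then (st.1, st.2.1, st.2.2 ++ [line])
  else st

def parse_queries_py (queries_content : String) : List (String × String) :=
  (pvFlushA ((PySem.Str.splitlines queries_content).foldl pvStepA
    (PySem.Dict.empty, "", ([] : List String)))).items

-- ===== PORT B =====
-- B's `_span_body`: split off the longest prefix of non-header lines
def pvSpanBody (lines : List String) : List String × List String :=
  match lines with
  | [] => ([], [])
  | l :: rest =>
    if ¬ PySem.Str.startswith l "--" then
      let p := pvSpanBody rest
      (l :: p.1, p.2)
    else ([], l :: rest)

theorem pvSpanBody_snd_length (lines : List String) : (pvSpanBody lines).2.length ≤ lines.length := by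
  induction lines with
  | nil => simp [pvSpanBody]
  | cons l rest ih =>
    simp only [pvSpanBody]
    split
    · simpa using Nat.le_succ_of_le ih
    · simp

-- B's `_sections`: consume one (header, body) section and recurse
def pvSections : List String → PySem.Dict String String → PySem.Dict String String
  | [], queries => queries
  | head :: rest, queries =>
    let p := pvSpanBody rest
    let queries' :=
      if PySem.Str.startswith head "--" then
        let name := PySem.Str.strip (PySem.Str.slice head (some 2) none)
        if name ≠ "" then queries.insert name (PySem.Str.join "\n" p.1) else queries
      else queries
    pvSections p.2 queries'
termination_by lines _ => lines.length
decreasing_by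
  simpa using Nat.lt_succ_of_le (pvSpanBody_snd_length rest)

def parse_queries_py_alt (queries_content : String) : List (String × String) :=
  (pvSections
    (((PySem.Str.splitlines queries_content).map PySem.Str.strip).filter (· ≠ ""))
    PySem.Dict.empty).items

-- ===== PRECONDITION & SPEC =====
def Spec_parse_queries_py (queries_content : String) (out : List (String × String)) : Prop := out = parse_queries_py_alt queries_content
instance (queries_content : String) (out : List (String × String)) : Decidable (Spec_parse_queries_py queries_content out) := by unfold Spec_parse_queries_py; infer_instance

-- ===== CLAIM (what is proved, stated in full; the proofs are below) =====
def Claim_equal_parse_queries_py : Prop := ∀ (queries_content : String), Dom_parse_queries_py queries_content → Spec_parse_queries_py queries_content (parse_queries_py queries_content)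

-- ===== LEMMAS AND PROOFS =====

def pvNE (cs : List Char) : Prop :=
  (∀ c, cs.head? = some c → PySem.Chars.isspace c = false) ∧
  (∀ c, cs.getLast? = some c → PySem.Chars.isspace c = false)

theorem pvHead?_dropWhile (p : Char → Bool) (l : List Char) (c : Char)
    (hc : (List.dropWhile p l).head? = some c) : p c = false := by
  have hne : List.dropWhile p l ≠ [] := by intro h; simp [h] at hc
  have hh := List.head_dropWhile_not p hne
  rw [List.head?_eq_some_head hne, Option.some_inj] at hc
  rw [← hc]; exact hh

theorem pvNE_strip (cs : List Char) : pvNE (PySem.Chars.strip cs) := by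
  unfold PySem.Chars.strip PySem.Chars.rstrip PySem.Chars.lstrip
  set y := List.dropWhile PySem.Chars.isspace cs with hy
  set w := List.dropWhile PySem.Chars.isspace y.reverse with hw
  constructor
  · intro c hc
    -- w.reverse is a prefix of y
    have hsuf : w <:+ y.reverse := List.dropWhile_suffix _
    obtain ⟨s, hs⟩ := hsuf
    have hyrev : y = w.reverse ++ s.reverse := by
      have := congrArg List.reverse hs
      simpa [List.reverse_append] using this.symm
    have hwne : w.reverse ≠ [] := by intro h; simp [h] at hc
    have : y.head? = some c := by
      rw [hyrev, List.head?_append_of_ne_nil _ hwne]; exact hc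
    exact pvHead?_dropWhile _ _ _ (hy ▸ this)
  · intro c hc
    rw [List.getLast?_eq_head?_reverse, List.reverse_reverse] at hc
    exact pvHead?_dropWhile _ _ _ hc

theorem pvDropWhile_eq_self (p : Char → Bool) (l : List Char)
    (h : ∀ c, l.head? = some c → p c = false) : List.dropWhile p l = l := by
  cases l with
  | nil => simp
  | cons a t => rw [List.dropWhile_cons, h a (by simp)]; simp

theorem pvStrip_of_NE (cs : List Char) (h : pvNE cs) : PySem.Chars.strip cs = cs := by
  unfold PySem.Chars.strip PySem.Chars.rstrip PySem.Chars.lstrip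
  rw [pvDropWhile_eq_self _ _ h.1]
  rw [pvDropWhile_eq_self _ _ (fun c hc => h.2 c (by rwa [List.head?_reverse] at hc)),
    List.reverse_reverse]

theorem pvJoin_ne_nil (sep q : List Char) (r : List (List Char)) (hq : q ≠ []) :
    PySem.Chars.join sep (q :: r) ≠ [] := by
  cases r with
  | nil => rwa [PySem.Chars.join_singleton]
  | cons s t => rw [PySem.Chars.join_cons_cons]; simp [hq]

theorem pvNE_join (parts : List (List Char))
    (h : ∀ p ∈ parts, p ≠ [] ∧ pvNE p) :
    pvNE (PySem.Chars.join "\n".toList parts) := by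
  induction parts with
  | nil => rw [PySem.Chars.join_nil]; exact ⟨by simp, by simp⟩
  | cons p ps ih =>
    cases ps with
    | nil =>
      rw [PySem.Chars.join_singleton]
      exact (h p (by simp)).2
    | cons q t =>
      rw [PySem.Chars.join_cons_cons]
      have hp := h p (by simp)
      have hrest := ih (fun x hx => h x (by simp [hx]))
      have hjne : PySem.Chars.join "\n".toList (q :: t) ≠ [] :=
        pvJoin_ne_nil _ _ _ (h q (by simp)).1
      constructor
      · intro c hc
        rw [List.append_assoc, List.head?_append_of_ne_nil _ hp.1] at hc
        exact hp.2.1 c hc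
      · intro c hc
        rw [List.getLast?_append] at hc
        rcases hg : (PySem.Chars.join "\n".toList (q :: t)).getLast? with _ | d
        · exact absurd hg (by
            intro h'
            exact hjne (List.getLast?_eq_none_iff.mp h'))
        · rw [hg] at hc
          simp at hc
          exact hc ▸ hrest.2 d hg

def pvClean (l : String) : Prop := PySem.Str.strip l = l ∧ l ≠ ""

theorem pvStrip_idem (l : String) : PySem.Str.strip (PySem.Str.strip l) = PySem.Str.strip l := by
  apply String.toList_inj.mp
  rw [PySem.Str.toList_strip, PySem.Str.toList_strip]
  exact pvStrip_of_NE _ (pvNE_strip _)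

theorem pvStrip_join (parts : List String) (h : ∀ l ∈ parts, pvClean l) :
    PySem.Str.strip (PySem.Str.join "\n" parts) = PySem.Str.join "\n" parts := by
  apply String.toList_inj.mp
  rw [PySem.Str.toList_strip, PySem.Str.toList_join]
  apply pvStrip_of_NE
  apply pvNE_join
  intro p hp
  obtain ⟨l, hl, rfl⟩ := List.mem_map.mp hp
  obtain ⟨h1, h2⟩ := h l hl
  refine ⟨by simpa using h2, ?_⟩
  have : PySem.Chars.strip l.toList = l.toList := by
    rw [← PySem.Str.toList_strip, h1]
  exact this ▸ pvNE_strip l.toList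

-- A's step on an already-stripped nonempty line (what pvStepA does once blanks are filtered)
def pvStepA' (st : PySem.Dict String String × String × List String) (line : String) :
    PySem.Dict String String × String × List String :=
  if PySem.Str.startswith line "--" then
    (pvFlushA st, PySem.Str.strip (PySem.Str.slice line (some 2) none), ([] : List String))
  else (st.1, st.2.1, st.2.2 ++ [line])

-- folding A's step over the raw lines = folding the simplified step over the cleaned lines
theorem pvFold_clean (raw : List String) (st : PySem.Dict String String × String × List String) :
    raw.foldl pvStepA st = ((raw.map PySem.Str.strip).filter (· ≠ "")).foldl pvStepA' st := by
  induction raw generalizing st with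
  | nil => simp
  | cons r t ih =>
    by_cases hr : PySem.Str.strip r = ""
    · have hstep : pvStepA st r = st := by
        unfold pvStepA
        rw [hr]
        simp
        intro hcon
        exact absurd hcon (by decide)
      rw [List.foldl_cons, hstep, List.map_cons, List.filter_cons, hr,
        if_neg (by simp)]
      exact ih st
    · have hstep : pvStepA st r = pvStepA' st (PySem.Str.strip r) := by
        unfold pvStepA pvStepA'
        simp only [PySem.Str.startswith_eq, PySem.Str.toList_strip]
        cases hs : PySem.Chars.startswith (PySem.Chars.strip r.toList) ['-', '-'] with
        | true => simp [hs]
        | false => simp [hs, hr]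
      simp only [List.foldl_cons, List.map_cons, List.filter_cons]
      rw [if_pos (by simpa using hr)]
      rw [List.foldl_cons, hstep]
      exact ih _

def pvHdr (l : String) : Bool := ¬ PySem.Str.startswith l "--"

theorem pvSpanBody_eq (lines : List String) :
    pvSpanBody lines = (lines.takeWhile pvHdr, lines.dropWhile pvHdr) := by
  induction lines with
  | nil => rfl
  | cons l rest ih =>
    simp only [pvSpanBody, List.takeWhile_cons, List.dropWhile_cons]
    cases hs : PySem.Str.startswith l "--" with
    | true => simp only [pvHdr, hs]; simp
    | false => simp only [pvHdr, hs]; simp [ih]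

theorem pvFlushA_eq (d : PySem.Dict String String) (name : String) (acc : List String)
    (ha : ∀ l ∈ acc, pvClean l) :
    pvFlushA (d, name, acc) =
      if name ≠ "" then d.insert name (PySem.Str.join "\n" acc) else d := by
  unfold pvFlushA
  rw [pvStrip_join acc ha]

-- the main invariant: finishing A's fold from any state equals B's section recursion
theorem pvMain (lines : List String) (hl : ∀ l ∈ lines, pvClean l)
    (d : PySem.Dict String String) (name : String) (acc : List String)
    (ha : ∀ l ∈ acc, pvClean l) :
    pvFlushA (lines.foldl pvStepA' (d, name, acc)) =
      pvSections (lines.dropWhile pvHdr)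
        (if name ≠ "" then
          d.insert name (PySem.Str.join "\n" (acc ++ lines.takeWhile pvHdr))
         else d) := by
  induction lines generalizing d name acc with
  | nil =>
    rw [List.foldl_nil, List.dropWhile_nil, List.takeWhile_nil, List.append_nil,
      pvSections, pvFlushA_eq d name acc ha]
  | cons l ls ih =>
    rw [List.foldl_cons]
    cases hs : PySem.Str.startswith l "--" with
    | false =>
      have hs' : PySem.Chars.startswith l.toList ['-', '-'] = false := by simpa using hs
      have hp : pvHdr l = true := by simp [pvHdr, hs']
      have hstep : pvStepA' (d, name, acc) l = (d, name, acc ++ [l]) := by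
        unfold pvStepA'
        simp [hs']
      have hacc : ∀ x ∈ acc ++ [l], pvClean x := by
        intro x hx
        rcases List.mem_append.mp hx with h | h
        · exact ha x h
        · simp at h
          exact h ▸ hl l (by simp)
      rw [hstep, ih (fun x hx => hl x (by simp [hx])) d name (acc ++ [l]) hacc,
        List.dropWhile_cons, List.takeWhile_cons, hp]
      simp
    | true =>
      have hs' : PySem.Chars.startswith l.toList ['-', '-'] = true := by simpa using hs
      have hp : pvHdr l = false := by simp [pvHdr, hs']
      have hstep : pvStepA' (d, name, acc) l =
          (pvFlushA (d, name, acc), PySem.Str.strip (PySem.Str.slice l (some 2) none),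
            ([] : List String)) := by
        unfold pvStepA'
        simp [hs']
      rw [hstep, ih (fun x hx => hl x (by simp [hx])) _ _ [] (by simp),
        List.dropWhile_cons, List.takeWhile_cons, hp]
      simp only [Bool.false_eq_true, if_false, List.append_nil]
      conv_rhs => rw [pvSections]
      simp only [pvSpanBody_eq, hs, if_true, List.nil_append]
      rw [pvFlushA_eq d name acc ha]

theorem pvSections_dropWhile (lines : List String) (d : PySem.Dict String String) :
    pvSections (lines.dropWhile pvHdr) d = pvSections lines d := by
  cases lines with
  | nil => rfl
  | cons l ls =>
    cases hs : PySem.Str.startswith l "--" with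
    | true =>
      have hs' : PySem.Chars.startswith l.toList ['-', '-'] = true := by simpa using hs
      have hp : pvHdr l = false := by simp [pvHdr, hs']
      rw [List.dropWhile_cons, hp]
      simp
    | false =>
      have hs' : PySem.Chars.startswith l.toList ['-', '-'] = false := by simpa using hs
      have hp : pvHdr l = true := by simp [pvHdr, hs']
      rw [List.dropWhile_cons, hp]
      conv_rhs => rw [pvSections]
      simp only [pvSpanBody_eq]
      simp [hs']

-- ===== VERDICT (by name: the statement is the Claim_ definition above) =====
theorem parse_queries_py_spec : Claim_equal_parse_queries_py := by
  unfold Claim_equal_parse_queries_py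
  intro s _
  unfold Spec_parse_queries_py parse_queries_py parse_queries_py_alt
  rw [pvFold_clean]
  have hclean : ∀ l ∈ ((PySem.Str.splitlines s).map PySem.Str.strip).filter (· ≠ ""),
      pvClean l := by
    intro l hmem
    obtain ⟨hm, hne⟩ := List.mem_filter.mp hmem
    obtain ⟨r, hr, rfl⟩ := List.mem_map.mp hm
    exact ⟨pvStrip_idem r, by simpa using hne⟩
  rw [pvMain _ hclean PySem.Dict.empty "" [] (by simp)]
  simp only [ne_eq, not_true_eq_false, if_false]
  rw [pvSections_dropWhile]
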